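/- GENERATED by farm/mkstatement.py from design/units.tsv (unit `neighbors`) and the Specs of Vorbis/Spec/*.lean — do not edit.
   THE STATEMENT of the proof unit `neighbors`: the function `neighbors` (65 instructions) satisfies its contract,
   given the contracts of its callees. What the names mean: Vorbis/Spec/Basic.lean. The theorem to prove:
   `theorem neighbors_ok : Vorbis.Spec.neighbors.Statement`. -/
import Vorbis.Spec.PacketRest
namespace Vorbis.Spec.neighbors
open X86 X86.User Asan

/-- The statement of unit `neighbors`. -/
def Statement : Prop :=
  ∀ (Lay : Layout) (_hLay : Lay.hi = 0x1000000) (μ : Microarch) (_hμ : UserX.MicroOK μ) (u₀ : State)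
    (_hcode : HasCodeNat Lay u₀ Vorbis.L.neighbors.entry Vorbis.Code.code_neighbors.nat Vorbis.L.neighbors.size)
    (_h_asan_load2_noabort : Asan.SmallCheck Lay μ Vorbis.WayInv (Vorbis.CodeOK u₀) [.rax, .rcx, .rdx] 2 Vorbis.L.__asan_load2_noabort.entry)
    (_h_asan_store4_noabort : Asan.SmallCheck Lay μ Vorbis.WayInv (Vorbis.CodeOK u₀) [.rax, .rcx, .rdx] 4 Vorbis.L.__asan_store4_noabort.entry),
    ∀ (others : List Obj) (frames : List (Nat × FrameLayout)), Calls Lay μ Vorbis.WayInv (Vorbis.conv u₀) Vorbis.L.neighbors.entry (Vorbis.Spec.neighbors.spec others frames)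

end Vorbis.Spec.neighbors
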